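-- pv_equiv track=rewrite | github.com/Nustinian/git_playground | interactive_mastermind.py | check_misses
-- ===== SOURCE A (Python) =====
-- def check_misses(guess, answer, correct_positions):
--     near_misses = 0
--     check_these_positions = [i for i in range(4) if i not in correct_positions]
--     also_added = []
--     for i in check_these_positions:
--         for j in check_these_positions:
--             if j not in also_added:
--                 if guess[i] == answer[j]:
--                     near_misses += 1
--                     also_added.append(j)
--                     break
--     return near_misses
-- ===== SOURCE B (Python) =====
-- def check_misses(guess, answer, correct_positions):
--     positions = [i for i in range(4) if i not in correct_positions]
--     guess_counts = {}
--     answer_counts = {}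
--     for i in positions:
--         g = guess[i]
--         a = answer[i]
--         guess_counts[g] = guess_counts.get(g, 0) + 1
--         answer_counts[a] = answer_counts.get(a, 0) + 1
--     return sum(min(n, answer_counts.get(c, 0)) for c, n in guess_counts.items())
-- ===== Notes on version B (the rewrite author's own statement) =====
-- stated objective: idiomatic
-- what changed: Replaces A's nested greedy matching loop with its also_added bookkeeping list by a single pass that builds colour-frequency dictionaries for guess and answer over the non-correct positions, returning the sum of min(guess_count, answer_count) over the guess colours.
import Mathlib
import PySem

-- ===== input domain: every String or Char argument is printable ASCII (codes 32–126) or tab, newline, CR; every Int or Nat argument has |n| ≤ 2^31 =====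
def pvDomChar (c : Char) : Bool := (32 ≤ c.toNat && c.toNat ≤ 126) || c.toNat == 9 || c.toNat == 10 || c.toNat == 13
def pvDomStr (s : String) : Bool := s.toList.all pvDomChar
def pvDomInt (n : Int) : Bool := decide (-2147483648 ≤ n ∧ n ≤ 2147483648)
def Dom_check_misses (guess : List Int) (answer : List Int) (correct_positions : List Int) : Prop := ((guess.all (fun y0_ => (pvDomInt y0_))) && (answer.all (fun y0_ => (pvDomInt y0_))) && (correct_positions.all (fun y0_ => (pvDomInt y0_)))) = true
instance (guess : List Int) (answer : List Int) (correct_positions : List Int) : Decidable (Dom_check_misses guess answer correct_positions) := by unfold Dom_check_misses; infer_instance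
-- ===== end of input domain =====

-- B replaces A's nested greedy matching loop by two one-pass colour counters and a
-- single min-sum over the guess counter (objective: idiomatic/alternative, same result).

-- ===== PORT A =====
-- inner 'for j in check_these_positions: …' loop: returns the first j not in also_added
-- with guess[i] == answer[j] (none = no break happened)
def pvCheckInner (gv : Int) (c : List Int) (answer : List Int) (added : List Int) : Option Int :=
  match c with
  | [] => none
  | j :: rest =>
    if added.contains j then pvCheckInner gv rest answer added
    else if gv == PySem.List.pyGetD answer j 0 then some j
    else pvCheckInner gv rest answer added

-- outer 'for i in check_these_positions: …' loop, carrying also_added and near_misses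
def pvCheckOuter (guess answer : List Int) (c : List Int) (rem : List Int)
    (added : List Int) (acc : Int) : Int :=
  match rem with
  | [] => acc
  | i :: rest =>
    match pvCheckInner (PySem.List.pyGetD guess i 0) c answer added with
    | some j => pvCheckOuter guess answer c rest (added ++ [j]) (acc + 1)
    | none => pvCheckOuter guess answer c rest added acc

def check_misses (guess : List Int) (answer : List Int) (correct_positions : List Int) : Int :=
  let check_these_positions := (PySem.List.pyRange 0 4 1).filter (fun i => !(correct_positions.contains i))
  pvCheckOuter guess answer check_these_positions check_these_positions [] 0

-- ===== PORT B =====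
def check_misses_alt (guess : List Int) (answer : List Int) (correct_positions : List Int) : Int :=
  let positions := (PySem.List.pyRange 0 4 1).filter (fun i => !(correct_positions.contains i))
  let counts := positions.foldl
    (fun (p : PySem.Dict Int Int × PySem.Dict Int Int) i =>
      (p.1.insert (PySem.List.pyGetD guess i 0) (p.1.getD (PySem.List.pyGetD guess i 0) 0 + 1),
       p.2.insert (PySem.List.pyGetD answer i 0) (p.2.getD (PySem.List.pyGetD answer i 0) 0 + 1)))
    (PySem.Dict.empty, PySem.Dict.empty)
  (counts.1.items.map (fun cn => min cn.2 (counts.2.getD cn.1 0))).sum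

-- ===== PRECONDITION & SPEC =====
-- Pre_: exactly the inputs on which the Python A returns (A raises IndexError as soon as some
-- considered position is out of range of guess or answer).
def Pre_check_misses (guess : List Int) (answer : List Int) (correct_positions : List Int) : Prop :=
  ∀ i ∈ PySem.List.pyRange 0 4 1, i ∉ correct_positions →
    PySem.Raise.InRange guess.length i ∧ PySem.Raise.InRange answer.length i
instance (guess : List Int) (answer : List Int) (correct_positions : List Int) : Decidable (Pre_check_misses guess answer correct_positions) := by unfold Pre_check_misses; infer_instance

def pvWitness_check_misses : List Int × List Int × List Int := ([1, 2, 3, 1], [2, 1, 1, 3], [0])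

def Spec_check_misses (guess : List Int) (answer : List Int) (correct_positions : List Int) (out : Int) : Prop := out = check_misses_alt guess answer correct_positions
instance (guess : List Int) (answer : List Int) (correct_positions : List Int) (out : Int) : Decidable (Spec_check_misses guess answer correct_positions out) := by unfold Spec_check_misses; infer_instance

-- ===== CLAIM (what is proved, stated in full; the proofs are below) =====
def Claim_equal_check_misses : Prop := ∀ (guess : List Int) (answer : List Int) (correct_positions : List Int), Dom_check_misses guess answer correct_positions → Pre_check_misses guess answer correct_positions → Spec_check_misses guess answer correct_positions (check_misses guess answer correct_positions)

-- ===== LEMMAS AND PROOFS =====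

-- A's matching loop, abstracted to the lists of colour values: repeatedly match the next
-- guess colour against (and remove from) the pool of still-unmatched answer colours.
def pvGreedy : List Int → List Int → Nat
  | [], _ => 0
  | g :: gs, as => if g ∈ as then 1 + pvGreedy gs (as.erase g) else pvGreedy gs as

theorem pvGreedy_eq_card_inter (gs : List Int) : ∀ as : List Int,
    pvGreedy gs as = Multiset.card ((gs : Multiset Int) ∩ (as : Multiset Int)) := by
  induction gs with
  | nil => intro as; simp [pvGreedy]
  | cons g gs ih =>
    intro as
    by_cases h : g ∈ as
    · rw [show ((g :: gs : List Int) : Multiset Int) = g ::ₘ (gs : Multiset Int) from rfl,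
        Multiset.cons_inter_of_pos _ (by simpa using h)]
      simp [pvGreedy, h, ih, ← Multiset.coe_erase, Nat.add_comm]
    · rw [show ((g :: gs : List Int) : Multiset Int) = g ::ₘ (gs : Multiset Int) from rfl,
        Multiset.cons_inter_of_neg _ (by simpa using h)]
      simp [pvGreedy, h, ih]

theorem pvCheckInner_mem (x : Int) : ∀ (c : List Int) (answer added : List Int) (j : Int),
    pvCheckInner x c answer added = some j → j ∈ c := by
  intro c
  induction c with
  | nil => intro answer added j h; simp [pvCheckInner] at h
  | cons k c ih =>
    intro answer added j h
    by_cases hadd : k ∈ added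
    · simp only [pvCheckInner, List.contains_iff_mem, hadd, if_true] at h
      exact List.mem_cons_of_mem _ (ih answer added j h)
    · by_cases heq : x = PySem.List.pyGetD answer k 0
      · simp [pvCheckInner, hadd, heq] at h
        exact h ▸ List.mem_cons_self
      · simp [pvCheckInner, hadd, heq] at h
        exact List.mem_cons_of_mem _ (ih answer added j h)

-- behaviour of A's inner loop, together with its effect on the pool of unmatched values
theorem pvCheckInner_spec (answer : List Int) (x : Int) :
    ∀ (c added : List Int), c.Nodup →
    (pvCheckInner x c answer added = none ∧
      x ∉ (c.filter (fun j => !added.contains j)).map (fun j => PySem.List.pyGetD answer j 0)) ∨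
    (∃ j, pvCheckInner x c answer added = some j ∧
      x ∈ (c.filter (fun j => !added.contains j)).map (fun j => PySem.List.pyGetD answer j 0) ∧
      (c.filter (fun j' => !(added ++ [j]).contains j')).map (fun j => PySem.List.pyGetD answer j 0)
        = ((c.filter (fun j' => !added.contains j')).map (fun j => PySem.List.pyGetD answer j 0)).erase x) := by
  intro c
  induction c with
  | nil => intro added _; left; simp [pvCheckInner]
  | cons k c ih =>
    intro added hnd
    have hk : k ∉ c := (List.nodup_cons.mp hnd).1
    have hnd' : c.Nodup := (List.nodup_cons.mp hnd).2
    by_cases hadd : k ∈ added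
    · -- k is already matched: both the loop and the filter skip it
      have hinner : pvCheckInner x (k :: c) answer added = pvCheckInner x c answer added := by
        simp [pvCheckInner, hadd]
      have hfk : (k :: c).filter (fun j => !added.contains j)
          = c.filter (fun j => !added.contains j) := by
        rw [List.filter_cons]; simp [hadd]
      rcases ih added hnd' with ⟨h1, h2⟩ | ⟨j, h1, h2, h3⟩
      · left; rw [hinner, hfk]; exact ⟨h1, h2⟩
      · right
        refine ⟨j, by rw [hinner]; exact h1, by rw [hfk]; exact h2, ?_⟩
        have hfk2 : (k :: c).filter (fun j' => !(added ++ [j]).contains j')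
            = c.filter (fun j' => !(added ++ [j]).contains j') := by
          rw [List.filter_cons]; simp [hadd]
        rw [hfk2, hfk]; exact h3
    · have hf1 : (k :: c).filter (fun j' => !added.contains j')
          = k :: c.filter (fun j' => !added.contains j') := by
        rw [List.filter_cons]; simp [hadd]
      by_cases heq : x = PySem.List.pyGetD answer k 0
      · -- the loop breaks at k
        right
        refine ⟨k, ?_, ?_, ?_⟩
        · simp [pvCheckInner, hadd, heq]
        · rw [hf1, List.map_cons, heq]; exact List.mem_cons_self
        · have hf2 : (k :: c).filter (fun j' => !(added ++ [k]).contains j')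
              = c.filter (fun j' => !added.contains j') := by
            rw [List.filter_cons]
            have h1 : ((added ++ [k]).contains k) = true := by simp
            rw [h1]
            simp only [Bool.not_true, Bool.false_eq_true, if_false]
            apply List.filter_congr
            intro j' hj'
            have hjk : j' ≠ k := fun hh => hk (hh ▸ hj')
            simp [hjk]
          rw [hf2, hf1, List.map_cons, heq, List.erase_cons_head]
      · -- no match at k: the loop moves on
        have hinner : pvCheckInner x (k :: c) answer added = pvCheckInner x c answer added := by
          simp [pvCheckInner, hadd, beq_iff_eq, heq]
        rcases ih added hnd' with ⟨h1, h2⟩ | ⟨j, h1, h2, h3⟩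
        · left
          refine ⟨by rw [hinner]; exact h1, ?_⟩
          rw [hf1, List.map_cons]
          intro hmem
          rcases List.mem_cons.mp hmem with hh | hh
          · exact heq hh
          · exact h2 hh
        · right
          have hjc : j ∈ c := pvCheckInner_mem x c answer added j h1
          have hkj : k ≠ j := fun hh => hk (hh ▸ hjc)
          refine ⟨j, by rw [hinner]; exact h1, ?_, ?_⟩
          · rw [hf1, List.map_cons]; exact List.mem_cons_of_mem _ h2
          · have hck : ((added ++ [j]).contains k) = added.contains k := by
              simp [hkj]
            have hf2 : (k :: c).filter (fun j' => !(added ++ [j]).contains j')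
                = k :: c.filter (fun j' => !(added ++ [j]).contains j') := by
              rw [List.filter_cons, hck]; simp [hadd]
            rw [hf2, hf1, List.map_cons, List.map_cons, h3,
              List.erase_cons_tail (by simp only [beq_iff_eq]; exact fun hh => heq hh.symm)]

-- A's outer loop counts exactly the greedy matching of the guess colours against the
-- pool of answer colours at the not-yet-matched positions
theorem pvCheckOuter_eq (guess answer : List Int) (c : List Int) (hc : c.Nodup) :
    ∀ (rem added : List Int) (acc : Int),
    pvCheckOuter guess answer c rem added acc
      = acc + (pvGreedy (rem.map (fun i => PySem.List.pyGetD guess i 0))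
          ((c.filter (fun j => !added.contains j)).map (fun j => PySem.List.pyGetD answer j 0)) : Int) := by
  intro rem
  induction rem with
  | nil => intro added acc; simp [pvCheckOuter, pvGreedy]
  | cons i rest ih =>
    intro added acc
    rcases pvCheckInner_spec answer (PySem.List.pyGetD guess i 0) c added hc with
      ⟨h1, h2⟩ | ⟨j, h1, h2, h3⟩
    · rw [show pvCheckOuter guess answer c (i :: rest) added acc
          = pvCheckOuter guess answer c rest added acc by simp [pvCheckOuter, h1]]
      rw [ih added acc, List.map_cons]
      simp only [pvGreedy]
      rw [if_neg h2]
    · rw [show pvCheckOuter guess answer c (i :: rest) added acc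
          = pvCheckOuter guess answer c rest (added ++ [j]) (acc + 1) by simp [pvCheckOuter, h1]]
      rw [ih (added ++ [j]) (acc + 1), h3, List.map_cons]
      simp only [pvGreedy]
      rw [if_pos h2]
      push_cast
      ring

-- value of A: the greedy matching of the colour lists at the considered positions
theorem check_misses_eq_greedy (guess answer correct_positions : List Int) :
    check_misses guess answer correct_positions
      = (pvGreedy
          (((PySem.List.pyRange 0 4 1).filter (fun i => !(correct_positions.contains i))).map
            (fun i => PySem.List.pyGetD guess i 0))
          (((PySem.List.pyRange 0 4 1).filter (fun i => !(correct_positions.contains i))).map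
            (fun j => PySem.List.pyGetD answer j 0)) : Int) := by
  have hc : ((PySem.List.pyRange 0 4 1).filter (fun i => !(correct_positions.contains i))).Nodup :=
    (PySem.List.nodup_pyRange_one 0 4).filter _
  rw [check_misses, pvCheckOuter_eq guess answer _ hc]
  simp

-- the min-sum over the distinct guess colours is the same cardinality (Nat level)
theorem sum_min_eq_card_inter (gs as : List Int) :
    ((PySem.Set.ofList gs).map (fun k => min (gs.count k) (as.count k))).sum
      = Multiset.card ((gs : Multiset Int) ∩ (as : Multiset Int)) := by
  have hnd : (PySem.Set.ofList gs).Nodup := PySem.Set.nodup_ofList gs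
  have hfin : (PySem.Set.ofList gs).toFinset = gs.toFinset := by
    apply Finset.ext; intro a
    simp [List.mem_toFinset, PySem.Set.mem_ofList]
  rw [← List.sum_toFinset _ hnd, hfin, ← Multiset.toFinset_sum_count_eq]
  have hsub : ((gs : Multiset Int) ∩ (as : Multiset Int)).toFinset ⊆ gs.toFinset := by
    intro a ha
    simp only [Multiset.mem_toFinset] at ha
    have := Multiset.mem_of_le (Multiset.inter_le_left (s := (gs : Multiset Int)) (t := as)) ha
    simpa [List.mem_toFinset] using this
  rw [Finset.sum_subset hsub]
  · apply Finset.sum_congr rfl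
    intro a _
    simp
  · intro a _ ha
    simp only [Multiset.mem_toFinset] at ha
    simpa using Multiset.count_eq_zero.mpr ha

-- casting a list min-sum from Nat to Int
theorem sum_min_cast (l gs as : List Int) :
    (l.map (fun k => min ((gs.count k : Int)) ((as.count k : Int)))).sum
      = ((l.map (fun k => min (gs.count k) (as.count k))).sum : Int) := by
  induction l with
  | nil => simp
  | cons k l ih =>
    simp only [List.map_cons, List.sum_cons, ih]
    push_cast
    ring

-- a fold that builds a pair componentwise is the pair of the two folds
theorem pvFoldlPair {α β γ : Type} (f : β → α → β) (g : γ → α → γ) :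
    ∀ (l : List α) (b : β) (c : γ),
    l.foldl (fun p x => (f p.1 x, g p.2 x)) (b, c) = (l.foldl f b, l.foldl g c) := by
  intro l
  induction l with
  | nil => intro b c; rfl
  | cons x l ih => intro b c; simp [List.foldl_cons, ih]

-- value of B: the min-sum over the distinct guess colours of the two counters
theorem check_misses_alt_eq_sum (guess answer correct_positions : List Int) :
    check_misses_alt guess answer correct_positions
      = ((PySem.Set.ofList
            (((PySem.List.pyRange 0 4 1).filter (fun i => !(correct_positions.contains i))).map
              (fun i => PySem.List.pyGetD guess i 0))).map
          (fun k => min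
            (((((PySem.List.pyRange 0 4 1).filter (fun i => !(correct_positions.contains i))).map
                (fun i => PySem.List.pyGetD guess i 0)).count k : Int))
            (((((PySem.List.pyRange 0 4 1).filter (fun i => !(correct_positions.contains i))).map
                (fun j => PySem.List.pyGetD answer j 0)).count k : Int)))).sum := by
  rw [check_misses_alt]
  set pos := (PySem.List.pyRange 0 4 1).filter (fun i => !(correct_positions.contains i)) with hpos
  have hpair : pos.foldl
      (fun (p : PySem.Dict Int Int × PySem.Dict Int Int) i =>
        (p.1.insert (PySem.List.pyGetD guess i 0) (p.1.getD (PySem.List.pyGetD guess i 0) 0 + 1),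
         p.2.insert (PySem.List.pyGetD answer i 0) (p.2.getD (PySem.List.pyGetD answer i 0) 0 + 1)))
      (PySem.Dict.empty, PySem.Dict.empty)
      = (PySem.Dict.counter (pos.map (fun i => PySem.List.pyGetD guess i 0)),
         PySem.Dict.counter (pos.map (fun j => PySem.List.pyGetD answer j 0))) := by
    rw [← PySem.Dict.foldl_insert_getD_add_one_eq_counter,
        ← PySem.Dict.foldl_insert_getD_add_one_eq_counter,
        List.foldl_map, List.foldl_map]
    exact pvFoldlPair
      (fun (d : PySem.Dict Int Int) (i : Int) =>
        d.insert (PySem.List.pyGetD guess i 0) (d.getD (PySem.List.pyGetD guess i 0) 0 + 1))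
      (fun (d : PySem.Dict Int Int) (i : Int) =>
        d.insert (PySem.List.pyGetD answer i 0) (d.getD (PySem.List.pyGetD answer i 0) 0 + 1))
      pos PySem.Dict.empty PySem.Dict.empty
  rw [hpair]
  simp only [PySem.Dict.items_counter, PySem.Dict.getD_counter, List.map_map]
  rfl

-- ===== VERDICT (by name: the statement is the Claim_ definition above) =====
theorem check_misses_spec : Claim_equal_check_misses := by
  intro guess answer correct_positions _ _
  unfold Spec_check_misses
  rw [check_misses_eq_greedy, check_misses_alt_eq_sum, sum_min_cast,
    pvGreedy_eq_card_inter, sum_min_eq_card_inter]
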